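-- pv_equiv track=rewrite | github.com/dav-rob/Flow4AI | src/jobchain/graph_art.py | _assign_layers
-- ===== SOURCE A (Python) =====
-- from typing import Dict, List, Any, Tuple, Set
--
-- def _assign_layers(graph_definition: Dict[str, Any],
--                    root: str) -> Dict[str, int]:
--     """
--     Assign layers (vertical positions) to nodes using a topological approach.
--
--     Args:
--         graph_definition: The graph definition
--         root: Root node
--
--     Returns:
--         Dictionary mapping nodes to their layer numbers
--     """
--     layers = {}
--     visited = set()
--
--     def dfs(node, layer):
--         if node in visited:
--             return
--         visited.add(node)
--
--         # Update layer if this path gives a higher layer number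
--         if node not in layers or layer > layers[node]:
--             layers[node] = layer
--
--         # Process children
--         for child in graph_definition.get(node, {}).get("next", []):
--             dfs(child, layer + 1)
--
--     dfs(root, 0)
--     return layers
-- ===== SOURCE B (Python) =====
-- def _assign_layers(graph_definition, root):
--     """Iterative re-implementation: explicit DFS stack; the layers dict itself
--     doubles as the visited set (a node is assigned its layer on first visit)."""
--     layers = {}
--     stack = [(root, 0)]
--     while stack:
--         node, layer = stack.pop()
--         if node in layers:
--             continue
--         layers[node] = layer
--         for child in reversed(graph_definition.get(node, {}).get("next", [])):
--             stack.append((child, layer + 1))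
--     return layers
-- ===== Notes on version B (the rewrite author's own statement) =====
-- stated objective: idiomatic
-- what changed: Replaces the recursive nested dfs helper with a separate visited set by an iterative explicit-stack DFS in which the layers dict itself serves as the visited marker; children are pushed in reverse so pop order reproduces the recursion's preorder.
import Mathlib
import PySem

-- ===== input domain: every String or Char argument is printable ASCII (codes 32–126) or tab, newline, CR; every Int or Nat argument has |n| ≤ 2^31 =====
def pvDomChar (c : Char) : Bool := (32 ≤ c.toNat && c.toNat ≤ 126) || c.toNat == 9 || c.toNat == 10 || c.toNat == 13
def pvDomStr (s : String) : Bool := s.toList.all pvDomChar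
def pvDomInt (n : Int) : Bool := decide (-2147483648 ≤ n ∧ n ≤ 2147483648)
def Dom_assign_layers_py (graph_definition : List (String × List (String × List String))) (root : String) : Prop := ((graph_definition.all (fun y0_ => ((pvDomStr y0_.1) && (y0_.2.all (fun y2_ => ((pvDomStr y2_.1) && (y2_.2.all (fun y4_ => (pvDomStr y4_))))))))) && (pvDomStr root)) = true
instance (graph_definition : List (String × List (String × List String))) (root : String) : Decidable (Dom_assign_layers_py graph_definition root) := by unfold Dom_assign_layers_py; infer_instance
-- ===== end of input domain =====

-- B replaces A's recursive dfs helper (with its separate visited set) by an iterative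
-- explicit-stack DFS whose layers dict doubles as the visited marker (idiomatic; same return value).

-- fuel bound shared by both ports' totality devices (the proofs show it is never exhausted):
-- every node the traversal can ever see is the root, a key of the graph, or listed in some value list
def pvUniv (graph_definition : List (String × List (String × List String))) (root : String) : List String :=
  root :: (graph_definition.map (·.1) ++ graph_definition.flatMap (fun e => e.2.flatMap (·.2)))

-- total number of child occurrences in the graph (fuel bound component for B's loop)
def pvEdges (graph_definition : List (String × List (String × List String))) : Nat :=
  (graph_definition.flatMap (fun e => e.2.flatMap (·.2))).length

-- ===== PORT A =====
-- graph_definition.get(node, {}).get("next", [])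
def pvChildrenA (graph_definition : List (String × List (String × List String))) (node : String) : List String :=
  PySem.Dict.getD (PySem.Dict.mk (PySem.Dict.getD (PySem.Dict.mk graph_definition) node [])) "next" []

-- the nested recursive helper dfs(node, layer) acting on the nonlocal state (visited, layers)
def pvDfsA (graph_definition : List (String × List (String × List String))) :
    Nat → String → Int → PySem.Set String × PySem.Dict String Int →
    PySem.Set String × PySem.Dict String Int
  | 0, _, _, st => st
  | fuel + 1, node, layer, st =>
    if PySem.Set.contains st.1 node then st
    else
      let visited := PySem.Set.add st.1 node
      let layers :=
        if !(PySem.Dict.contains st.2 node) || decide (PySem.Dict.getD st.2 node 0 < layer)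
        then PySem.Dict.insert st.2 node layer else st.2
      (pvChildrenA graph_definition node).foldl
        (fun s c => pvDfsA graph_definition fuel c (layer + 1) s) (visited, layers)

def assign_layers_py (graph_definition : List (String × List (String × List String))) (root : String) : List (String × Int) :=
  (pvDfsA graph_definition ((pvUniv graph_definition root).length + 1) root 0
    (PySem.Set.empty, PySem.Dict.empty)).2.items

-- ===== PORT B =====
-- graph_definition.get(node, {}).get("next", [])
def pvChildrenB (graph_definition : List (String × List (String × List String))) (node : String) : List String :=
  PySem.Dict.getD (PySem.Dict.mk (PySem.Dict.getD (PySem.Dict.mk graph_definition) node [])) "next" []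

-- the while loop over the explicit stack (list head = stack top)
def pvLoopB (graph_definition : List (String × List (String × List String))) :
    Nat → List (String × Int) → PySem.Dict String Int → PySem.Dict String Int
  | 0, _, layers => layers
  | _ + 1, [], layers => layers
  | fuel + 1, (node, layer) :: stack, layers =>
    if PySem.Dict.contains layers node then pvLoopB graph_definition fuel stack layers
    else
      pvLoopB graph_definition fuel
        ((pvChildrenB graph_definition node).reverse.foldl (fun s c => (c, layer + 1) :: s) stack)
        (PySem.Dict.insert layers node layer)

def assign_layers_py_alt (graph_definition : List (String × List (String × List String))) (root : String) : List (String × Int) :=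
  (pvLoopB graph_definition
    (1 + (pvUniv graph_definition root).length * (pvEdges graph_definition + 1))
    [(root, 0)] PySem.Dict.empty).items

-- ===== PRECONDITION & SPEC =====
def Spec_assign_layers_py (graph_definition : List (String × List (String × List String))) (root : String) (out : List (String × Int)) : Prop := out = assign_layers_py_alt graph_definition root
instance (graph_definition : List (String × List (String × List String))) (root : String) (out : List (String × Int)) : Decidable (Spec_assign_layers_py graph_definition root out) := by unfold Spec_assign_layers_py; infer_instance

-- ===== CLAIM (what is proved, stated in full; the proofs are below) =====
def Claim_equal_assign_layers_py : Prop := ∀ (graph_definition : List (String × List (String × List String))) (root : String), Dom_assign_layers_py graph_definition root → Spec_assign_layers_py graph_definition root (assign_layers_py graph_definition root)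

-- ===== LEMMAS AND PROOFS =====

-- number of universe nodes not yet in S (the termination measure of the traversal)
def pvRem (g : List (String × List (String × List String))) (root : String)
    (S : List String) : Nat :=
  ((PySem.List.dedup (pvUniv g root)).filter (fun x => !decide (x ∈ S))).length

-- A's visited set and B's layers dict hold the same nodes
def pvInv (v : PySem.Set String) (L : PySem.Dict String Int) : Prop :=
  ∀ x : String, x ∈ v ↔ x ∈ L.keys

theorem pv_filter_le {α : Type} (l : List α) (p q : α → Bool)
    (h : ∀ x ∈ l, q x = true → p x = true) :
    (l.filter q).length ≤ (l.filter p).length := by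
  induction l with
  | nil => simp
  | cons a t ih =>
    have ih' := ih (fun x hx => h x (List.mem_cons_of_mem _ hx))
    cases hqa : q a with
    | true => have hpa := h a List.mem_cons_self hqa; simp [hqa, hpa]; omega
    | false => cases hpa : p a <;> simp [hqa, hpa] <;> omega

theorem pv_filter_lt {α : Type} (l : List α) (p q : α → Bool)
    (h : ∀ x ∈ l, q x = true → p x = true) (x : α) (hx : x ∈ l)
    (hpx : p x = true) (hqx : q x = false) :
    (l.filter q).length < (l.filter p).length := by
  induction l with
  | nil => simp at hx
  | cons a t ih =>
    have hle := pv_filter_le t p q (fun y hy => h y (List.mem_cons_of_mem _ hy))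
    rcases List.mem_cons.mp hx with rfl | hxt
    · simp [hqx, hpx]; omega
    · have ih' := ih (fun y hy => h y (List.mem_cons_of_mem _ hy)) hxt
      cases hqa : q a with
      | true => have hpa := h a List.mem_cons_self hqa; simp [hqa, hpa]; omega
      | false => cases hpa : p a <;> simp [hqa, hpa] <;> omega

theorem pvRem_le (g : List (String × List (String × List String))) (root : String)
    (S S' : List String) (h : ∀ y, y ∈ S → y ∈ S') :
    pvRem g root S' ≤ pvRem g root S := by
  apply pv_filter_le
  intro y _ hy
  simp at hy ⊢
  exact fun hmem => hy (h y hmem)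

theorem pvRem_lt (g : List (String × List (String × List String))) (root : String)
    (S S' : List String) (x : String) (hxU : x ∈ pvUniv g root) (hxS : x ∉ S)
    (h : ∀ y, y ∈ S → y ∈ S') (hxS' : x ∈ S') :
    pvRem g root S' < pvRem g root S := by
  apply pv_filter_lt _ _ _ (fun y _ hy => by simp at hy ⊢; exact fun hmem => hy (h y hmem)) x
  · simpa [PySem.List.mem_dedup] using hxU
  · simpa using hxS
  · simpa using hxS'

theorem pvGetD_mem_or {ν : Type} (d : List (String × ν)) (k : String) (dflt : ν) :
    PySem.Dict.getD (PySem.Dict.mk d) k dflt = dflt ∨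
    (k, PySem.Dict.getD (PySem.Dict.mk d) k dflt) ∈ d := by
  rw [PySem.Dict.getD_eq_get?_getD]
  cases hg : (PySem.Dict.mk d).get? k with
  | none => simp
  | some v =>
    right
    have := PySem.Dict.mem_items_of_get?_eq_some (d := PySem.Dict.mk d) hg
    simpa using this

theorem pvChildren_subset (g : List (String × List (String × List String))) (root : String)
    (n c : String) (hc : c ∈ pvChildrenA g n) : c ∈ pvUniv g root := by
  unfold pvChildrenA at hc
  rcases pvGetD_mem_or g n [] with h1 | h1
  · rw [h1] at hc; simp [PySem.Dict.getD_eq_get?_getD, PySem.Dict.get?] at hc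
  · rcases pvGetD_mem_or (PySem.Dict.getD (PySem.Dict.mk g) n []) "next" [] with h2 | h2
    · rw [h2] at hc; simp at hc
    · refine List.mem_cons_of_mem _ (List.mem_append_right _ ?_)
      refine List.mem_flatMap.mpr ⟨(n, _), h1, ?_⟩
      exact List.mem_flatMap.mpr ⟨("next", _), h2, hc⟩

theorem pvChildren_len (g : List (String × List (String × List String)))
    (n : String) : (pvChildrenA g n).length ≤ pvEdges g := by
  unfold pvChildrenA pvEdges
  rcases pvGetD_mem_or g n [] with h1 | h1
  · rw [h1]; simp [PySem.Dict.getD_eq_get?_getD, PySem.Dict.get?]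
  · rcases pvGetD_mem_or (PySem.Dict.getD (PySem.Dict.mk g) n []) "next" [] with h2 | h2
    · rw [h2]; simp
    · calc (PySem.Dict.getD (PySem.Dict.mk (PySem.Dict.getD (PySem.Dict.mk g) n [])) "next" []).length
          ≤ ((n, PySem.Dict.getD (PySem.Dict.mk g) n []).2.flatMap (·.2)).length := by
            simp only [List.length_flatMap]
            exact List.le_sum_of_mem (List.mem_map.mpr ⟨("next", _), h2, rfl⟩)
        _ ≤ (g.flatMap (fun e => e.2.flatMap (·.2))).length := by
            simp only [List.length_flatMap]
            exact List.le_sum_of_mem (List.mem_map.mpr ⟨(n, _), h1, rfl⟩)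

theorem pvDfsA_mono_inv (g : List (String × List (String × List String))) :
    ∀ (fuel : Nat) (node : String) (layer : Int)
      (st : PySem.Set String × PySem.Dict String Int),
      (∀ x, x ∈ st.1 → x ∈ (pvDfsA g fuel node layer st).1) ∧
      (pvInv st.1 st.2 → pvInv (pvDfsA g fuel node layer st).1 (pvDfsA g fuel node layer st).2) := by
  intro fuel
  induction fuel with
  | zero => intro node layer st; simp [pvDfsA]
  | succ fuel ih =>
    intro node layer st
    rw [pvDfsA]
    by_cases hc : PySem.Set.contains st.1 node = true
    · have hmem : node ∈ st.1 := by simpa [PySem.Set.contains] using hc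
      simp [hmem]
    · simp only [hc, if_false, Bool.false_eq_true]
      -- state after marking node
      set v1 := PySem.Set.add st.1 node with hv1
      have hnotmem : node ∉ st.1 := by
        intro hm; exact hc (by simpa [PySem.Set.contains] using hm)
      have hfold : ∀ (cs : List String) (w : Int)
          (s : PySem.Set String × PySem.Dict String Int),
          (∀ x, x ∈ s.1 → x ∈ (cs.foldl (fun s c => pvDfsA g fuel c w s) s).1) ∧
          (pvInv s.1 s.2 → pvInv (cs.foldl (fun s c => pvDfsA g fuel c w s) s).1
              (cs.foldl (fun s c => pvDfsA g fuel c w s) s).2) := by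
        intro cs w
        induction cs with
        | nil => intro s; simp
        | cons a t iht =>
          intro s
          simp only [List.foldl_cons]
          constructor
          · intro x hx
            exact (iht _).1 x ((ih a w s).1 x hx)
          · intro hinv
            exact (iht _).2 ((ih a w s).2 hinv)
      constructor
      · intro x hx
        exact (hfold _ _ _).1 x (by simp [hv1, PySem.Set.mem_add, hx])
      · intro hinv
        apply (hfold _ _ _).2
        have hcL : PySem.Dict.contains st.2 node = false := by
          rw [PySem.Dict.contains_eq_isSome_get?]
          cases hg : st.2.get? node with
          | none => rfl
          | some w =>
            exfalso
            have hit : (node, w) ∈ st.2.items := PySem.Dict.mem_items_of_get?_eq_some st.2 hg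
            exact hnotmem ((hinv node).mpr (PySem.Dict.mem_keys_of_mem_items st.2 hit))
        simp only [hcL, Bool.not_false, Bool.true_or, if_true]
        intro x
        simp [hv1, PySem.Set.mem_add, PySem.Dict.mem_keys_insert, hinv x]
        tauto

theorem pvFoldA_mono_inv (g : List (String × List (String × List String))) (fa : Nat)
    (ps : List (String × Int)) (st : PySem.Set String × PySem.Dict String Int) :
    (∀ x, x ∈ st.1 → x ∈ (ps.foldl (fun s p => pvDfsA g fa p.1 p.2 s) st).1) ∧
    (pvInv st.1 st.2 →
      pvInv (ps.foldl (fun s p => pvDfsA g fa p.1 p.2 s) st).1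
            (ps.foldl (fun s p => pvDfsA g fa p.1 p.2 s) st).2) := by
  induction ps generalizing st with
  | nil => simp
  | cons a t ih =>
    simp only [List.foldl_cons]
    constructor
    · intro x hx
      exact (ih _).1 x ((pvDfsA_mono_inv g fa a.1 a.2 st).1 x hx)
    · intro hinv
      exact (ih _).2 ((pvDfsA_mono_inv g fa a.1 a.2 st).2 hinv)

-- fuel irrelevance for the fold over a stack segment, given it for single calls below level k

theorem pvFoldA_fuel_of (g : List (String × List (String × List String))) (root : String)
    (k fa fb : Nat)
    (hP : ∀ (node : String) (layer : Int) (st : PySem.Set String × PySem.Dict String Int),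
      node ∈ pvUniv g root → pvRem g root st.1 ≤ k →
      pvDfsA g fa node layer st = pvDfsA g fb node layer st)
    (ps : List (String × Int)) (st : PySem.Set String × PySem.Dict String Int)
    (hU : ∀ p ∈ ps, p.1 ∈ pvUniv g root) (hk : pvRem g root st.1 ≤ k) :
    ps.foldl (fun s p => pvDfsA g fa p.1 p.2 s) st
      = ps.foldl (fun s p => pvDfsA g fb p.1 p.2 s) st := by
  induction ps generalizing st with
  | nil => rfl
  | cons a t ih =>
    simp only [List.foldl_cons]
    rw [hP a.1 a.2 st (hU a (List.mem_cons_self)) hk]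
    apply ih _ (fun p hp => hU p (List.mem_cons_of_mem _ hp))
    calc pvRem g root (pvDfsA g fb a.1 a.2 st).1
        ≤ pvRem g root st.1 := pvRem_le g root _ _ ((pvDfsA_mono_inv g fb a.1 a.2 st).1)
      _ ≤ k := hk

theorem pvDfsA_fuel (g : List (String × List (String × List String))) (root : String) :
    ∀ (k fa fb : Nat) (node : String) (layer : Int)
      (st : PySem.Set String × PySem.Dict String Int),
      node ∈ pvUniv g root → pvRem g root st.1 ≤ k → k < fa → k < fb →
      pvDfsA g fa node layer st = pvDfsA g fb node layer st := by
  intro k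
  induction k using Nat.strong_induction_on with
  | _ k ihk =>
    intro fa fb node layer st hU hk hfa hfb
    obtain ⟨fa', rfl⟩ : ∃ fa', fa = fa' + 1 := ⟨fa - 1, by omega⟩
    obtain ⟨fb', rfl⟩ : ∃ fb', fb = fb' + 1 := ⟨fb - 1, by omega⟩
    rw [pvDfsA, pvDfsA]
    by_cases hc : PySem.Set.contains st.1 node = true
    · have hmem : node ∈ st.1 := by simpa [PySem.Set.contains] using hc
      simp [hmem]
    · have hcf : PySem.Set.contains st.1 node = false := by
        cases h : PySem.Set.contains st.1 node
        · rfl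
        · exact absurd h hc
      simp only [hcf, Bool.false_eq_true, if_false]
      have hnotmem : node ∉ st.1 := fun hm => hc (by simpa [PySem.Set.contains] using hm)
      have hmem' : node ∈ PySem.Set.add st.1 node := by
        rw [PySem.Set.mem_add]; right; rfl
      have hlt : pvRem g root (PySem.Set.add st.1 node) < pvRem g root st.1 :=
        pvRem_lt g root st.1 _ node hU hnotmem
          (fun y hy => by rw [PySem.Set.mem_add]; left; exact hy) hmem'
      -- k' := pvRem (add) ≤ k - 1
      have hk' : pvRem g root (PySem.Set.add st.1 node) ≤ k - 1 := by omega
      have hres := pvFoldA_fuel_of g root (k - 1) fa' fb'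
        (fun n l s hn hs => ihk (k - 1) (by omega) fa' fb' n l s hn hs (by omega) (by omega))
        ((pvChildrenA g node).map (fun c => (c, layer + 1)))
        (PySem.Set.add st.1 node,
          if !(PySem.Dict.contains st.2 node) || decide (PySem.Dict.getD st.2 node 0 < layer)
          then PySem.Dict.insert st.2 node layer else st.2)
        (by intro p hp
            rcases List.mem_map.mp hp with ⟨c, hcmem, rfl⟩
            exact pvChildren_subset g root node c hcmem)
        (by simpa using hk')
      rw [List.foldl_map, List.foldl_map] at hres
      exact hres

theorem pvRevPush (cs : List String) (w : Int) (st : List (String × Int)) :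
    cs.reverse.foldl (fun s c => (c, w) :: s) st = cs.map (fun c => (c, w)) ++ st := by
  induction cs generalizing st with
  | nil => simp
  | cons a t ih => simp [List.foldl_append, ih]

theorem pvBridge (g : List (String × List (String × List String))) (root : String) :
    ∀ (fb : Nat) (stack : List (String × Int)) (v : PySem.Set String)
      (L : PySem.Dict String Int) (fa : Nat),
      pvInv v L → (∀ p ∈ stack, p.1 ∈ pvUniv g root) →
      pvRem g root v < fa →
      stack.length + pvRem g root v * (pvEdges g + 1) ≤ fb →
      pvLoopB g fb stack L
        = (stack.foldl (fun st p => pvDfsA g fa p.1 p.2 st) (v, L)).2 := by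
  intro fb
  induction fb with
  | zero =>
    intro stack v L fa hinv hU hfa hfb
    have : stack = [] := by
      cases stack with
      | nil => rfl
      | cons a t => simp at hfb
    subst this
    simp [pvLoopB]
  | succ fb ih =>
    intro stack v L fa hinv hU hfa hfb
    cases stack with
    | nil => simp [pvLoopB]
    | cons p rest =>
      obtain ⟨n, l⟩ := p
      have hnU : n ∈ pvUniv g root := hU (n, l) (List.mem_cons_self)
      obtain ⟨fa', rfl⟩ : ∃ fa', fa = fa' + 1 := ⟨fa - 1, by omega⟩
      rw [pvLoopB]
      by_cases hcL : PySem.Dict.contains L n = true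
      · -- already assigned: both sides skip
        have hnv : n ∈ v := (hinv n).mpr ((PySem.Dict.contains_iff_mem_keys L n).mp hcL)
        simp only [hcL, if_true]
        rw [ih rest v L (fa' + 1) hinv (fun q hq => hU q (List.mem_cons_of_mem _ hq)) hfa
          (by simp at hfb ⊢; omega)]
        simp only [List.foldl_cons]
        rw [pvDfsA]
        have hcv : PySem.Set.contains v n = true := by
          simpa [PySem.Set.contains] using hnv
        simp [hnv]
      · -- first visit
        have hcLf : PySem.Dict.contains L n = false := by
          cases h : PySem.Dict.contains L n
          · rfl
          · exact absurd h hcL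
        have hnv : n ∉ v := fun hm =>
          hcL ((PySem.Dict.contains_iff_mem_keys L n).mpr ((hinv n).mp hm))
        simp only [hcLf, Bool.false_eq_true, if_false]
        set v' := PySem.Set.add v n with hv'
        set L' := PySem.Dict.insert L n l with hL'
        have hinv' : pvInv v' L' := by
          intro x
          rw [hv', hL', PySem.Set.mem_add, PySem.Dict.mem_keys_insert]
          have := hinv x
          tauto
        have hlt : pvRem g root v' < pvRem g root v :=
          pvRem_lt g root v v' n hnU hnv
            (fun y hy => by rw [hv', PySem.Set.mem_add]; left; exact hy)
            (by rw [hv', PySem.Set.mem_add]; right; rfl)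
        have hclen : (pvChildrenB g n).length ≤ pvEdges g := pvChildren_len g n
        have hmul : pvRem g root v' * (pvEdges g + 1) + (pvEdges g + 1)
            ≤ pvRem g root v * (pvEdges g + 1) := by
          have h1 : pvRem g root v' + 1 ≤ pvRem g root v := hlt
          calc pvRem g root v' * (pvEdges g + 1) + (pvEdges g + 1)
              = (pvRem g root v' + 1) * (pvEdges g + 1) := by ring
            _ ≤ pvRem g root v * (pvEdges g + 1) := Nat.mul_le_mul_right _ h1
        rw [pvRevPush]
        have hstack' : ∀ q ∈ (pvChildrenB g n).map (fun c => (c, l + 1)) ++ rest,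
            q.1 ∈ pvUniv g root := by
          intro q hq
          rcases List.mem_append.mp hq with hq | hq
          · rcases List.mem_map.mp hq with ⟨c, hcm, rfl⟩
            exact pvChildren_subset g root n c hcm
          · exact hU q (List.mem_cons_of_mem _ hq)
        rw [ih _ v' L' fa' hinv' hstack' (by omega)
          (by simp at hfb ⊢
              have := hclen
              omega)]
        -- now match A's side
        simp only [List.foldl_cons]
        rw [pvDfsA]
        have hcv : PySem.Set.contains v n = false := by
          cases h : PySem.Set.contains v n
          · rfl
          · exact absurd (by simpa [PySem.Set.contains] using h : n ∈ v) hnv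
        simp only [hcv, Bool.false_eq_true, if_false, hcLf, Bool.not_false, Bool.true_or, if_true]
        rw [List.foldl_append, List.foldl_map]
        -- children segments coincide (pvChildrenB = pvChildrenA by definition);
        -- on the rest segment lower A's fuel from fa'+1 to fa'
        have hBA : pvChildrenB g n = pvChildrenA g n := rfl
        rw [hBA]
        have hmono : pvRem g root ((pvChildrenA g n).foldl
            (fun s c => pvDfsA g fa' c (l + 1) s) (v', L')).1 ≤ pvRem g root v' := by
          have hm := (pvFoldA_mono_inv g fa'
            ((pvChildrenA g n).map (fun c => (c, l + 1))) (v', L')).1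
          rw [List.foldl_map] at hm
          exact pvRem_le g root _ _ hm
        exact congrArg Prod.snd (pvFoldA_fuel_of g root (pvRem g root v') fa' (fa' + 1)
          (fun node layer st hn hs =>
            pvDfsA_fuel g root (pvRem g root v') fa' (fa' + 1) node layer st hn hs
              (by omega) (by omega))
          rest _ (fun q hq => hU q (List.mem_cons_of_mem _ hq)) hmono)

theorem pvOfList_len_le {α : Type} [BEq α] [LawfulBEq α] (xs : List α) :
    ∀ s : PySem.Set α, (xs.foldl PySem.Set.add s).length ≤ s.length + xs.length := by
  induction xs with
  | nil => intro s; simp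
  | cons a t ih =>
    intro s
    have h1 : (PySem.Set.add s a).length ≤ s.length + 1 := by
      rw [PySem.Set.add]
      split <;> simp
    have := ih (PySem.Set.add s a)
    simp only [List.foldl_cons, List.length_cons]
    omega

theorem pvRem_bound (g : List (String × List (String × List String))) (root : String)
    (S : List String) : pvRem g root S ≤ (pvUniv g root).length := by
  calc pvRem g root S ≤ (PySem.List.dedup (pvUniv g root)).length := List.length_filter_le _ _
    _ ≤ (pvUniv g root).length := by
        rw [PySem.List.dedup_eq_ofList, PySem.Set.ofList_eq_foldl]
        simpa using pvOfList_len_le (pvUniv g root) PySem.Set.empty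

theorem pv_final (g : List (String × List (String × List String))) (root : String) :
    assign_layers_py g root = assign_layers_py_alt g root := by
  unfold assign_layers_py assign_layers_py_alt
  have hinv : pvInv PySem.Set.empty PySem.Dict.empty := by
    intro x
    simp [PySem.Set.empty, PySem.Dict.empty, PySem.Dict.keys]
  have hb := pvRem_bound g root ([] : List String)
  have h := pvBridge g root
    (1 + (pvUniv g root).length * (pvEdges g + 1))
    [(root, 0)] PySem.Set.empty PySem.Dict.empty
    ((pvUniv g root).length + 1) hinv
    (by intro p hp; simp at hp; subst hp; exact List.mem_cons_self)
    (by have h2 : pvRem g root PySem.Set.empty = pvRem g root [] := rfl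
        omega)
    (by have h2 : pvRem g root PySem.Set.empty = pvRem g root [] := rfl
        have := Nat.mul_le_mul_right (pvEdges g + 1) hb
        simp
        omega)
  rw [h]
  simp

-- ===== VERDICT (by name: the statement is the Claim_ definition above) =====
theorem assign_layers_py_spec : Claim_equal_assign_layers_py := by
  intro graph_definition root _
  unfold Spec_assign_layers_py
  exact pv_final graph_definition root
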